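-- pv_equiv track=rewrite | github.com/tcosmo/OptimalSupSpePython | StageFev1/correc.py | une_suite
-- ===== SOURCE A (Python) =====
-- def une_suite(L):
--     # astuce, on transforme L en chaine de caractère
--     # pour utiliser les méthodes .find et .replace qui vont
--     # faire le taf pour nous
--     L_str = "".join(map(str,L))# transforme [1,1,0] en "110"
--
--     max_len_ones = -1
--     where = -1
--     for len_ones in range(1,len(L_str)):
--         new_where = L_str.find("1"*len_ones)# on teste si "1..1" (len_ones fois) est dans la chaine
--         if new_where == -1:# si find renvoie -1, ca n'y est pas pour cette taille, pas la peine de continuer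
--             break
--
--         max_len_ones = len_ones
--         where = new_where
--
--     if where == -1: # si pas de 1 du tout
--         return L
--
--     L_str = L_str.replace("1"*max_len_ones,"2"*max_len_ones,1) # remplacer 1 fois "1...1" par "2...2"
--     return list(map(int,list(L_str))) # transformation inverse
-- ===== SOURCE B (Python) =====
-- def une_suite(L):
--     # One linear pass over the decimal digits: track the longest run of 1s
--     # (first one on ties) and splice in the 2s directly.
--     digits = [int(c) for x in L for c in str(x)]
--     best_len = 0
--     best_start = 0
--     cur = 0
--     for i, d in enumerate(digits):
--         if d == 1:
--             cur += 1
--             if cur > best_len: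
--                 best_len = cur
--                 best_start = i - cur + 1
--         else:
--             cur = 0
--     if best_len == 0:
--         return L
--     return digits[:best_start] + [2] * best_len + digits[best_start + best_len:]
-- ===== Notes on version B (the rewrite author's own statement) =====
-- stated objective: alternative
-- what changed: Replaces A's try-every-run-length loop of str.find calls plus str.replace by a single linear pass over the digit list that tracks the longest 1-run and its first start index, then splices the 2s in directly (O(n) instead of O(n*r)).
-- intended difference: On nonempty lists whose every element is a repunit (decimal digits all 1, e.g. [1,1]) the whole digit string is ones and A's loop 'range(1, len(L_str))' stops one run length short, so A leaves the last 1 unreplaced ([1,1] -> [2,1]); B replaces the entire run ([1,1] -> [2,2]), which is the intended 'replace the longest run of 1s'. — e.g. on une_suite([1, 1]): A returns [2, 1], B returns [2, 2]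
-- outside the precondition, e.g. on une_suite([-2]): A returns [-2], B raises ValueError
import Mathlib
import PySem

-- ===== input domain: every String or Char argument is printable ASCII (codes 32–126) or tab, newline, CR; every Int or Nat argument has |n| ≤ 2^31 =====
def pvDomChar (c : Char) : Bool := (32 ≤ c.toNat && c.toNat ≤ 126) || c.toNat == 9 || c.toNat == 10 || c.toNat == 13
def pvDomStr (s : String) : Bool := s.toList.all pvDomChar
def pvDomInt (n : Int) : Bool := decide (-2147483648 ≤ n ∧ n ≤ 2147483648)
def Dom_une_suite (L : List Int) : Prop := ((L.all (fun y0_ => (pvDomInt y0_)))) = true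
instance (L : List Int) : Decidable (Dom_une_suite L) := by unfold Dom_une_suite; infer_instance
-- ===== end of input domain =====

set_option maxRecDepth 8192

-- B replaces A's try-every-run-length loop of find calls by one linear pass that tracks
-- the longest 1-run and its first start index (objective: alternative, a single-pass algorithm).

-- ===== PORT A =====
-- int(c) for a one-character string; Python raises ValueError (none) on non-digit
-- characters — Pre_ (all entries nonnegative) keeps every character a decimal digit
def pvVal (c : Char) : Int := (PySem.Int.ofChars? [c]).getD 0

-- the 'for len_ones in range(1, len(L_str))' loop with its break, as structural recursion
def une_suite_loop (s : List Char) : List Int → Int × Int → Int × Int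
  | [], st => st
  | len_ones :: rest, st =>
    let new_where := PySem.Chars.find s (List.replicate len_ones.toNat '1')
    if new_where = -1 then st
    else une_suite_loop s rest (len_ones, new_where)

def une_suite (L : List Int) : List Int :=
  let L_str := L.flatMap PySem.Int.toChars        -- "".join(map(str, L)) as its character list
  let st := une_suite_loop L_str (PySem.List.pyRange 1 (PySem.List.len L_str) 1) (-1, -1)
  if st.2 = -1 then L
  else
    -- L_str.replace("1"*m, "2"*m, 1): splice in "2"*m at the first occurrence of "1"*m
    -- (hand port of str.replace with count 1; PySem.Chars.replace replaces every occurrence)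
    let old := List.replicate st.1.toNat '1'
    let i := PySem.Chars.find L_str old
    let L_str2 := if i = -1 then L_str
      else L_str.take i.toNat ++ List.replicate st.1.toNat '2' ++ L_str.drop (i.toNat + old.length)
    L_str2.map pvVal

-- ===== PORT B =====
-- state (best_len, (best_start, cur)); input (i, d) from enumerate(digits)
def une_suite_alt_step (st : Int × Int × Int) (p : Int × Int) : Int × Int × Int :=
  if p.2 = 1 then
    let cur := st.2.2 + 1
    if st.1 < cur then (cur, (p.1 - cur + 1, cur)) else (st.1, (st.2.1, cur))
  else (st.1, (st.2.1, 0))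

def une_suite_alt (L : List Int) : List Int :=
  let digits := L.flatMap (fun x => (PySem.Int.toChars x).map pvVal)
  let st := (PySem.List.enumerate digits 0).foldl une_suite_alt_step (0, (0, 0))
  if st.1 = 0 then L
  else
    PySem.List.slice digits none (some st.2.1) ++ List.replicate st.1.toNat 2 ++
      PySem.List.slice digits (some (st.2.1 + st.1)) none

-- ===== PRECONDITION & SPEC =====
-- Pre_ restricts to the function's natural domain (lists of nonnegative integers): on a
-- negative entry Python's int('-') makes A raise ValueError whenever any digit 1 occurs
-- (and makes B always raise); on negative entries whose digit string contains no 1, A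
-- happens to return L unchanged — an input outside the natural domain of the task.
def Pre_une_suite (L : List Int) : Prop := ∀ x ∈ L, 0 ≤ x
instance (L : List Int) : Decidable (Pre_une_suite L) := by unfold Pre_une_suite; infer_instance

def pvWitness_une_suite : List Int := [1, 0, 1, 1]

-- On nonempty lists whose every element is a repunit (decimal digits all 1, e.g. [1,1])
-- the whole digit string is ones and A's loop 'range(1, len(L_str))' stops one run
-- length short, so A leaves the last 1 unreplaced ([1,1] -> [2,1]); B replaces the entire
-- run ([1,1] -> [2,2]), which is the intended 'replace the longest run of 1s with 2s'.
def D_une_suite (L : List Int) : Prop :=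
  L ≠ [] ∧ L.all (fun x => (PySem.Int.toChars x).all (fun c => c == '1')) = true
instance (L : List Int) : Decidable (D_une_suite L) := by unfold D_une_suite; infer_instance

def Spec_une_suite (L : List Int) (out : List Int) : Prop := ¬ D_une_suite L → out = une_suite_alt L
instance (L : List Int) (out : List Int) : Decidable (Spec_une_suite L out) := by
  unfold Spec_une_suite; infer_instance

def pvDiffWitness_une_suite : List Int := [1, 1]
def pvDiffWitnessOut_une_suite : (List Int) × (List Int) := ([2, 1], [2, 2])

-- ===== CLAIM (what is proved, stated in full; the proofs are below) =====
def Claim_unchanged_une_suite : Prop :=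
  ∀ (L : List Int), Dom_une_suite L → Pre_une_suite L → Spec_une_suite L (une_suite L)
def Claim_changed_une_suite : Prop :=
  Dom_une_suite (pvDiffWitness_une_suite) ∧ Pre_une_suite (pvDiffWitness_une_suite) ∧
  D_une_suite (pvDiffWitness_une_suite) ∧
  une_suite (pvDiffWitness_une_suite) = pvDiffWitnessOut_une_suite.1 ∧
  une_suite_alt (pvDiffWitness_une_suite) = pvDiffWitnessOut_une_suite.2 ∧
  pvDiffWitnessOut_une_suite.1 ≠ pvDiffWitnessOut_une_suite.2
def Claim_exact_une_suite : Prop :=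
  ∀ (L : List Int), Dom_une_suite L → Pre_une_suite L → D_une_suite L →
    une_suite L ≠ une_suite_alt L

-- ===== LEMMAS AND PROOFS =====

-- length of the leading run of '1's
def pvLead : List Char → Nat
  | [] => 0
  | c :: t => if c = '1' then pvLead t + 1 else 0

-- length of the longest run of '1's (max over all suffix starts)
def pvMaxRun : List Char → Nat
  | [] => 0
  | c :: t => max (pvLead (c :: t)) (pvMaxRun t)

-- length of the trailing run of '1's
def pvTrail (s : List Char) : Nat := pvLead s.reverse

-- j is the first index at which a window of m consecutive '1's starts
def pvFF (s : List Char) (m j : Nat) : Prop :=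
  m ≤ pvLead (s.drop j) ∧ ∀ i < j, pvLead (s.drop i) < m

theorem pvLead_le_length (s : List Char) : pvLead s ≤ s.length := by
  induction s with
  | nil => simp [pvLead]
  | cons c t ih => simp only [pvLead, List.length_cons]; split <;> omega

theorem pvLead_eq_length_iff (s : List Char) : pvLead s = s.length ↔ ∀ c ∈ s, c = '1' := by
  induction s with
  | nil => simp [pvLead]
  | cons c t ih =>
    simp only [pvLead, List.length_cons, List.mem_cons]
    by_cases hc : c = '1'
    · rw [if_pos hc]
      constructor
      · intro h
        rintro d (rfl | hd)
        · exact hc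
        · exact (ih.mp (by omega)) d hd
      · intro h
        have := ih.mpr (fun d hd => h d (Or.inr hd))
        omega
    · rw [if_neg hc]
      constructor
      · intro h; omega
      · intro h; exact absurd (h c (Or.inl rfl)) hc

theorem pvLead_append (u v : List Char) :
    pvLead (u ++ v) = if pvLead u = u.length then u.length + pvLead v else pvLead u := by
  induction u with
  | nil => simp [pvLead]
  | cons c t ih =>
    by_cases hc : c = '1'
    · have ht := pvLead_le_length t
      simp only [List.cons_append, pvLead, if_pos hc, ih, List.length_cons]
      split_ifs <;> omega
    · simp [pvLead, hc]

theorem pvTrail_le_length (s : List Char) : pvTrail s ≤ s.length := by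
  simpa [pvTrail] using pvLead_le_length s.reverse

theorem pvTrail_append_singleton (s : List Char) (c : Char) :
    pvTrail (s ++ [c]) = if c = '1' then pvTrail s + 1 else 0 := by
  simp only [pvTrail, List.reverse_append, List.reverse_singleton, List.singleton_append]
  rfl

theorem pvLead_le_maxRun (s : List Char) : pvLead s ≤ pvMaxRun s := by
  cases s with
  | nil => simp [pvLead, pvMaxRun]
  | cons c t => simp [pvMaxRun]

theorem pvMaxRun_le_length (s : List Char) : pvMaxRun s ≤ s.length := by
  induction s with
  | nil => simp [pvMaxRun]
  | cons c t ih =>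
    have := pvLead_le_length (c :: t)
    simp only [pvMaxRun, List.length_cons] at *
    omega

theorem pvLead_drop_le_maxRun (s : List Char) (i : Nat) : pvLead (s.drop i) ≤ pvMaxRun s := by
  induction s generalizing i with
  | nil => simp [pvLead, pvMaxRun]
  | cons c t ih =>
    cases i with
    | zero => exact pvLead_le_maxRun _
    | succ j =>
      have := ih j
      simp only [List.drop_succ_cons, pvMaxRun] at *
      omega

theorem pvExists_drop_maxRun (s : List Char) : ∃ j, pvMaxRun s ≤ pvLead (s.drop j) := by
  induction s with
  | nil => exact ⟨0, le_refl _⟩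
  | cons c t ih =>
    obtain ⟨j, hj⟩ := ih
    by_cases h : pvMaxRun t ≤ pvLead (c :: t)
    · exact ⟨0, by simp only [List.drop_zero, pvMaxRun]; omega⟩
    · exact ⟨j + 1, by simp only [List.drop_succ_cons, pvMaxRun]; omega⟩

theorem pvRepl_prefix_iff (s : List Char) (k : Nat) :
    List.replicate k '1' <+: s ↔ k ≤ pvLead s := by
  induction s generalizing k with
  | nil =>
    cases k with
    | zero => simp
    | succ m => simp [pvLead, List.replicate_succ]
  | cons c t ih =>
    cases k with
    | zero => simp
    | succ m =>
      rw [List.replicate_succ, List.cons_prefix_cons]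
      by_cases hc : c = '1'
      · subst hc
        have hl1 : pvLead ('1' :: t) = pvLead t + 1 := by simp [pvLead]
        rw [hl1]
        constructor
        · rintro ⟨-, h⟩; have := (ih m).mp h; omega
        · intro h; exact ⟨rfl, (ih m).mpr (by omega)⟩
      · simp only [pvLead, if_neg hc]
        constructor
        · rintro ⟨h, -⟩; exact absurd h.symm hc
        · omega

theorem pvRepl_infix_iff (s : List Char) (k : Nat) :
    List.replicate k '1' <:+: s ↔ k ≤ pvMaxRun s := by
  rw [← PySem.Chars.isIn_iff_infix, ← PySem.Chars.exists_prefix_drop_iff_isIn]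
  constructor
  · rintro ⟨j, hj⟩
    exact le_trans ((pvRepl_prefix_iff _ k).mp hj) (pvLead_drop_le_maxRun s j)
  · intro h
    obtain ⟨j, hj⟩ := pvExists_drop_maxRun s
    exact ⟨j, (pvRepl_prefix_iff _ k).mpr (le_trans h hj)⟩

-- characters of the trailing run are all '1'
theorem pvDrop_trail_all_ones (s : List Char) :
    ∀ c ∈ s.drop (s.length - pvTrail s), c = '1' := by
  have htake : ∀ (u : List Char), ∀ c ∈ u.take (pvLead u), c = '1' := by
    intro u
    induction u with
    | nil => simp
    | cons a t ih =>
      by_cases ha : a = '1'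
      · simp only [pvLead, if_pos ha, List.take_succ_cons, List.mem_cons]
        rintro c (rfl | hc)
        · exact ha
        · exact ih c hc
      · simp [pvLead, ha]
  intro c hc
  have hrev : s.drop (s.length - pvTrail s) = (s.reverse.take (pvTrail s)).reverse := by
    rw [List.take_reverse, List.reverse_reverse]
  rw [hrev, List.mem_reverse] at hc
  exact htake s.reverse c hc

theorem pvLead_drop_trail (s : List Char) :
    pvLead (s.drop (s.length - pvTrail s)) = pvTrail s := by
  have h1 := (pvLead_eq_length_iff (s.drop (s.length - pvTrail s))).mpr (pvDrop_trail_all_ones s)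
  rw [h1, List.length_drop]
  have := pvTrail_le_length s
  omega

-- an all-'1' suffix is at most the trailing run
theorem pvTrail_ge_of_drop_ones (s : List Char) (i : Nat) (h : ∀ c ∈ s.drop i, c = '1') :
    s.length - i ≤ pvTrail s := by
  have hs : s = s.take i ++ s.drop i := (List.take_append_drop i s).symm
  have hthis : pvTrail s = pvLead ((s.drop i).reverse ++ (s.take i).reverse) := by
    calc pvTrail s = pvLead (List.reverse (s.take i ++ s.drop i)) := by rw [← hs]; rfl
      _ = pvLead ((s.drop i).reverse ++ (s.take i).reverse) := by rw [List.reverse_append]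
  rw [hthis, pvLead_append]
  have hall : pvLead (s.drop i).reverse = ((s.drop i).reverse).length :=
    (pvLead_eq_length_iff _).mpr (fun c hc => h c (List.mem_reverse.mp hc))
  rw [if_pos hall]
  simp only [List.length_reverse, List.length_drop]
  omega

theorem pvMaxRun_append_singleton (s : List Char) (c : Char) :
    pvMaxRun (s ++ [c]) = max (pvMaxRun s) (if c = '1' then pvTrail s + 1 else 0) := by
  induction s with
  | nil => by_cases hc : c = '1' <;> simp [pvMaxRun, pvLead, pvTrail, hc]
  | cons a q ih =>
    have e1 : (a :: q) ++ [c] = a :: (q ++ [c]) := rfl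
    have h1 : pvMaxRun (a :: (q ++ [c])) = max (pvLead (a :: (q ++ [c]))) (pvMaxRun (q ++ [c])) := rfl
    have h2 : pvMaxRun (a :: q) = max (pvLead (a :: q)) (pvMaxRun q) := rfl
    have hla : pvLead (a :: (q ++ [c])) = if a = '1' then pvLead (q ++ [c]) + 1 else 0 := rfl
    have hlaq : pvLead (a :: q) = if a = '1' then pvLead q + 1 else 0 := rfl
    have hlqc : pvLead (q ++ [c]) = if pvLead q = q.length then q.length + pvLead [c] else pvLead q :=
      pvLead_append q [c]
    have hlc : pvLead [c] = if c = '1' then 1 else 0 := rfl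
    have htrail : pvTrail (a :: q)
        = if pvTrail q = q.length then q.length + (if a = '1' then 1 else 0) else pvTrail q := by
      have hx : pvTrail (a :: q) = pvLead (q.reverse ++ [a]) := by
        simp [pvTrail, List.reverse_cons]
      rw [hx, pvLead_append, List.length_reverse]
      rfl
    have hlq := pvLead_le_length q
    have hmq := pvMaxRun_le_length q
    have htq := pvTrail_le_length q
    have hlmq := pvLead_le_maxRun q
    have hallq : pvLead q = q.length ↔ pvTrail q = q.length := by
      unfold pvTrail
      rw [pvLead_eq_length_iff, show q.length = q.reverse.length by simp, pvLead_eq_length_iff]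
      constructor
      · intro h d hd; exact h d (List.mem_reverse.mp hd)
      · intro h d hd; exact h d (List.mem_reverse.mpr hd)
    by_cases hall : pvLead q = q.length
    · have ht' : pvTrail q = q.length := hallq.mp hall
      have hm' : pvMaxRun q = q.length := le_antisymm hmq (by omega)
      rw [e1, h1, ih, h2, hla, hlaq, hlqc, hlc, htrail]
      split_ifs <;> omega
    · have ht' : pvTrail q ≠ q.length := fun h => hall (hallq.mpr h)
      rw [e1, h1, ih, h2, hla, hlaq, hlqc, hlc, htrail]
      split_ifs <;> omega

-- ---- the scan invariant for B's fold ----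

theorem pvFF_bound {s : List Char} {m j : Nat} (hm : 0 < m) (h : pvFF s m j) :
    j + m ≤ s.length := by
  have h1 := h.1
  have h2 := pvLead_le_length (s.drop j)
  rw [List.length_drop] at h2
  by_cases hj : j ≤ s.length
  · omega
  · rw [List.drop_eq_nil_of_le (by omega)] at h1
    simp [pvLead] at h1
    omega

theorem pvFF_not_one (s : List Char) (c : Char) (hc : c ≠ '1') {m j : Nat} (hm : 0 < m)
    (h : pvFF s m j) : pvFF (s ++ [c]) m j := by
  have hb := pvFF_bound hm h
  constructor
  · rw [List.drop_append_of_le_length (by omega), pvLead_append]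
    have := h.1
    split_ifs <;> omega
  · intro i hi
    rw [List.drop_append_of_le_length (by omega), pvLead_append]
    have h2 := h.2 i hi
    have hnall : ¬ pvLead (s.drop i) = (s.drop i).length ∨ pvLead [c] = 0 := by
      right; simp [pvLead, hc]
    rcases hnall with h3 | h3
    · rw [if_neg h3]; omega
    · split_ifs <;> omega

theorem pvFF_one_keep (s : List Char) {j : Nat} (hm : 0 < pvMaxRun s)
    (h : pvFF s (pvMaxRun s) j) (hle : pvTrail s + 1 ≤ pvMaxRun s) :
    pvFF (s ++ ['1']) (pvMaxRun s) j := by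
  have hb := pvFF_bound hm h
  constructor
  · rw [List.drop_append_of_le_length (by omega), pvLead_append]
    have := h.1
    split_ifs <;> omega
  · intro i hi
    rw [List.drop_append_of_le_length (by omega), pvLead_append]
    have h2 := h.2 i hi
    by_cases h3 : pvLead (s.drop i) = (s.drop i).length
    · -- s.drop i is all ones, hence inside the trailing run: contradiction with i < j
      have hones : ∀ d ∈ s.drop i, d = '1' := (pvLead_eq_length_iff _).mp h3
      have htr := pvTrail_ge_of_drop_ones s i hones
      rw [if_pos h3]
      simp only [pvLead, List.length_drop] at *
      omega
    · rw [if_neg h3]; omega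

theorem pvFF_one_up (s : List Char) (hgt : pvMaxRun s < pvTrail s + 1) :
    pvFF (s ++ ['1']) (pvTrail s + 1) (s.length - pvTrail s) := by
  have htl := pvTrail_le_length s
  have h1 : pvLead ['1'] = 1 := by simp [pvLead]
  constructor
  · rw [List.drop_append_of_le_length (by omega), pvLead_append,
      if_pos (by rw [pvLead_drop_trail, List.length_drop]; omega), h1, List.length_drop]
    omega
  · intro i hi
    rw [List.drop_append_of_le_length (by omega), pvLead_append]
    have hle := pvLead_drop_le_maxRun s i
    by_cases h3 : pvLead (s.drop i) = (s.drop i).length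
    · have hones : ∀ d ∈ s.drop i, d = '1' := (pvLead_eq_length_iff _).mp h3
      have htr := pvTrail_ge_of_drop_ones s i hones
      omega
    · rw [if_neg h3]; omega

theorem pvVal_eq_one_iff (c : Char) (h : c.isDigit) : (pvVal c = 1) ↔ c = '1' := by
  have h2 : 48 ≤ c.toNat ∧ c.toNat ≤ 57 := by
    simp [Char.isDigit] at h
    exact ⟨h.1, h.2⟩
  obtain ⟨n, h1, h3, rfl⟩ : ∃ n, 48 ≤ n ∧ n ≤ 57 ∧ c = Char.ofNat n :=
    ⟨c.toNat, h2.1, h2.2, (Char.ofNat_toNat c).symm⟩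
  unfold pvVal
  interval_cases n <;> decide

theorem pvDigit_of_mem_toChars (x : Int) (hx : 0 ≤ x) (c : Char)
    (hc : c ∈ PySem.Int.toChars x) : c.isDigit := by
  unfold PySem.Int.toChars at hc
  rw [if_neg (by omega)] at hc
  exact Nat.isDigit_of_mem_toDigits (by norm_num) (by norm_num) hc

-- B's fold, run over the digits of p ++ t starting after p, lands on the state for p ++ t
theorem pvScan_spec (t : List Char) (hd : ∀ c ∈ t, c.isDigit) :
    ∀ (p : List Char) (j : Nat), (0 < pvMaxRun p → pvFF p (pvMaxRun p) j) →
    ∃ j' : Nat,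
      (PySem.List.enumerate (t.map pvVal) (p.length : Int)).foldl une_suite_alt_step
        ((pvMaxRun p : Int), ((j : Int), (pvTrail p : Int)))
        = ((pvMaxRun (p ++ t) : Int), ((j' : Int), (pvTrail (p ++ t) : Int))) ∧
      (0 < pvMaxRun (p ++ t) → pvFF (p ++ t) (pvMaxRun (p ++ t)) j') := by
  induction t with
  | nil =>
    intro p j hj
    exact ⟨j, by simp, by simpa using hj⟩
  | cons c t ih =>
    intro p j hj
    have hcd : c.isDigit := hd c (List.mem_cons_self ..)
    have hd' : ∀ d ∈ t, d.isDigit := fun d hdm => hd d (List.mem_cons_of_mem _ hdm)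
    have htl := pvTrail_le_length p
    have hlen : ((p.length : Int) + 1) = (((p ++ [c]).length : Nat) : Int) := by simp
    rw [List.map_cons, PySem.List.enumerate_cons, List.foldl_cons]
    by_cases hc : c = '1'
    · subst hc
      have hmr : pvMaxRun (p ++ ['1']) = max (pvMaxRun p) (pvTrail p + 1) := by
        rw [pvMaxRun_append_singleton, if_pos rfl]
      have htr : pvTrail (p ++ ['1']) = pvTrail p + 1 := by
        rw [pvTrail_append_singleton, if_pos rfl]
      have hv1 : pvVal '1' = 1 := by decide
      by_cases hlt : pvMaxRun p < pvTrail p + 1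
      · have hstep : une_suite_alt_step ((pvMaxRun p : Int), ((j : Int), (pvTrail p : Int)))
            ((p.length : Int), pvVal '1')
            = ((pvMaxRun (p ++ ['1']) : Int),
               (((p.length - pvTrail p : Nat) : Int), (pvTrail (p ++ ['1']) : Int))) := by
          unfold une_suite_alt_step
          rw [if_pos (by simp [hv1]), if_pos (by push_cast; omega), hmr, htr]
          refine congrArg₂ Prod.mk (by push_cast; omega) (congrArg₂ Prod.mk (by push_cast; omega) (by push_cast; omega))
        have hj2 : 0 < pvMaxRun (p ++ ['1']) →
            pvFF (p ++ ['1']) (pvMaxRun (p ++ ['1'])) (p.length - pvTrail p) := by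
          intro _
          rw [hmr, max_eq_right (by omega)]
          exact pvFF_one_up p hlt
        rw [hstep, hlen]
        obtain ⟨j', hfold, hff⟩ := ih hd' (p ++ ['1']) _ hj2
        refine ⟨j', ?_, ?_⟩
        · rw [hfold, List.append_assoc, List.singleton_append]
        · rw [List.append_assoc, List.singleton_append] at hff; exact hff
      · have hstep : une_suite_alt_step ((pvMaxRun p : Int), ((j : Int), (pvTrail p : Int)))
            ((p.length : Int), pvVal '1')
            = ((pvMaxRun (p ++ ['1']) : Int), ((j : Int), (pvTrail (p ++ ['1']) : Int))) := by
          unfold une_suite_alt_step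
          rw [if_pos (by simp [hv1]), if_neg (by push_cast; omega), hmr, htr]
          refine congrArg₂ Prod.mk (by push_cast; omega) (congrArg₂ Prod.mk rfl (by push_cast; omega))
        have hmr' : pvMaxRun (p ++ ['1']) = pvMaxRun p := by rw [hmr]; omega
        have hj2 : 0 < pvMaxRun (p ++ ['1']) →
            pvFF (p ++ ['1']) (pvMaxRun (p ++ ['1'])) j := by
          intro hpos
          rw [hmr'] at hpos ⊢
          exact pvFF_one_keep p hpos (hj hpos) (by omega)
        rw [hstep, hlen]
        obtain ⟨j', hfold, hff⟩ := ih hd' (p ++ ['1']) _ hj2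
        refine ⟨j', ?_, ?_⟩
        · rw [hfold, List.append_assoc, List.singleton_append]
        · rw [List.append_assoc, List.singleton_append] at hff; exact hff
    · have hmr' : pvMaxRun (p ++ [c]) = pvMaxRun p := by
        rw [pvMaxRun_append_singleton, if_neg hc]; omega
      have htr : pvTrail (p ++ [c]) = 0 := by
        rw [pvTrail_append_singleton, if_neg hc]
      have hstep : une_suite_alt_step ((pvMaxRun p : Int), ((j : Int), (pvTrail p : Int)))
          ((p.length : Int), pvVal c)
          = ((pvMaxRun (p ++ [c]) : Int), ((j : Int), (pvTrail (p ++ [c]) : Int))) := by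
        unfold une_suite_alt_step
        rw [if_neg (by simpa using fun h => hc ((pvVal_eq_one_iff c hcd).mp h)), hmr', htr]
        simp
      have hj2 : 0 < pvMaxRun (p ++ [c]) → pvFF (p ++ [c]) (pvMaxRun (p ++ [c])) j := by
        intro hpos
        rw [hmr'] at hpos ⊢
        exact pvFF_not_one p c hc hpos (hj hpos)
      rw [hstep, hlen]
      obtain ⟨j', hfold, hff⟩ := ih hd' (p ++ [c]) _ hj2
      refine ⟨j', ?_, ?_⟩
      · rw [hfold, List.append_assoc, List.singleton_append]
      · rw [List.append_assoc, List.singleton_append] at hff; exact hff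

-- ---- A's loop ----

theorem pvLoopA_spec (s : List Char) :
    ∀ (k : Nat) (a b : Int) (st : Int × Int), (b - a).toNat = k → 1 ≤ a →
    une_suite_loop s (PySem.List.pyRange a b 1) st =
      if a ≤ (pvMaxRun s : Int) ∧ a < b
      then (((min (pvMaxRun s) ((b-1).toNat) : Nat) : Int),
            PySem.Chars.find s (List.replicate (min (pvMaxRun s) ((b-1).toNat)) '1'))
      else st := by
  intro k
  induction k with
  | zero =>
    intro a b st hk ha
    rw [PySem.List.pyRange_one_eq_nil (by omega), if_neg (by omega)]
    rfl
  | succ n ih =>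
    intro a b st hk ha
    have hab : a < b := by omega
    rw [PySem.List.pyRange_one_cons hab]
    show (if PySem.Chars.find s (List.replicate a.toNat '1') = -1 then st
      else une_suite_loop s (PySem.List.pyRange (a+1) b 1) (a, PySem.Chars.find s (List.replicate a.toNat '1'))) = _
    by_cases hfind : PySem.Chars.find s (List.replicate a.toNat '1') = -1
    · rw [if_pos hfind]
      have hnot : ¬ (a.toNat ≤ pvMaxRun s) := by
        rw [← pvRepl_infix_iff, ← PySem.Chars.find_ne_neg_one_iff]
        simpa using hfind
      rw [if_neg (by omega)]
    · rw [if_neg hfind]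
      have hle : a.toNat ≤ pvMaxRun s := by
        rw [← pvRepl_infix_iff, ← PySem.Chars.find_nonneg_iff]
        have := PySem.Chars.neg_one_le_find s (List.replicate a.toNat '1')
        omega
      rw [ih (a+1) b _ (by omega) (by omega)]
      by_cases hcont : a + 1 ≤ (pvMaxRun s : Int) ∧ a + 1 < b
      · rw [if_pos hcont, if_pos (by omega)]
      · rw [if_neg hcont, if_pos (by omega)]
        have hmin : min (pvMaxRun s) ((b-1).toNat) = a.toNat := by omega
        rw [hmin]
        refine Prod.ext (by simp; omega) rfl

-- maxRun is short of the full length as soon as some character differs from '1'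
theorem pvMaxRun_lt_of_ne (s : List Char) (c : Char) (hc : c ∈ s) (h1 : c ≠ '1') :
    pvMaxRun s < s.length := by
  have hle := pvMaxRun_le_length s
  rcases Nat.lt_or_ge (pvMaxRun s) s.length with h | h
  · exact h
  · exfalso
    obtain ⟨j, hj⟩ := pvExists_drop_maxRun s
    have hlen := pvLead_le_length (s.drop j)
    rw [List.length_drop] at hlen
    have hpos : 0 < s.length := List.length_pos_of_mem hc
    have hls := pvLead_le_length s
    have hj0 : j = 0 := by omega
    subst hj0
    rw [List.drop_zero] at hj
    have hx : pvLead s = s.length := by omega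
    exact h1 ((pvLead_eq_length_iff s).mp hx c hc)

-- digits of the joined string are the mapped characters
theorem pvDigits_eq (L : List Int) :
    L.flatMap (fun x => (PySem.Int.toChars x).map pvVal) = (L.flatMap PySem.Int.toChars).map pvVal := by
  rw [List.map_flatMap]

theorem pvAll_digits (L : List Int) (hL : ∀ x ∈ L, 0 ≤ x) :
    ∀ c ∈ L.flatMap PySem.Int.toChars, c.isDigit := by
  intro c hc
  obtain ⟨x, hx, hcx⟩ := List.mem_flatMap.mp hc
  exact pvDigit_of_mem_toChars x (hL x hx) c hcx

-- the two spliced outputs agree once the replacement start indices agree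
theorem pvVal_two : pvVal '2' = 2 := by decide

theorem pvNotD (L : List Int) (hD : ¬ D_une_suite L)
    (hr : 0 < pvMaxRun (L.flatMap PySem.Int.toChars)) :
    ∃ c ∈ L.flatMap PySem.Int.toChars, c ≠ '1' := by
  unfold D_une_suite at hD
  rw [not_and_or] at hD
  rcases hD with hD | hD
  · exfalso
    rw [not_ne_iff] at hD
    subst hD
    simp [pvMaxRun] at hr
  · rw [List.all_eq_true] at hD
    push Not at hD
    obtain ⟨x, hx, hxall⟩ := hD
    rw [ne_eq, List.all_eq_true] at hxall
    push Not at hxall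
    obtain ⟨c, hc, hc1⟩ := hxall
    exact ⟨c, List.mem_flatMap.mpr ⟨x, hx, hc⟩, by simpa using hc1⟩

-- B's scan, started from the empty prefix
theorem pvScan_run (L : List Int) (hpre : ∀ x ∈ L, 0 ≤ x) :
    ∃ j' : Nat,
      (PySem.List.enumerate ((L.flatMap PySem.Int.toChars).map pvVal) 0).foldl
          une_suite_alt_step (0, (0, 0))
        = ((pvMaxRun (L.flatMap PySem.Int.toChars) : Int),
           ((j' : Int), (pvTrail (L.flatMap PySem.Int.toChars) : Int))) ∧
      (0 < pvMaxRun (L.flatMap PySem.Int.toChars) →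
        pvFF (L.flatMap PySem.Int.toChars) (pvMaxRun (L.flatMap PySem.Int.toChars)) j') := by
  obtain ⟨j', hfold, hff⟩ :=
    pvScan_spec (L.flatMap PySem.Int.toChars) (pvAll_digits L hpre) [] 0
      (by intro h; simp [pvMaxRun] at h)
  rw [List.nil_append] at hfold hff
  norm_num [pvMaxRun, pvTrail, pvLead] at hfold
  exact ⟨j', hfold, hff⟩

-- the heart of the claim: outside D_ the two ports agree
theorem pvEquiv (L : List Int) (hpre : ∀ x ∈ L, 0 ≤ x) (hD : ¬ D_une_suite L) :
    une_suite L = une_suite_alt L := by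
  obtain ⟨j', hfold, hff⟩ := pvScan_run L hpre
  simp only [une_suite, une_suite_alt, PySem.List.len_eq, pvDigits_eq]
  rw [hfold]
  rcases Nat.eq_zero_or_pos (pvMaxRun (L.flatMap PySem.Int.toChars)) with hr | hr
  · -- no 1 at all: both return L
    have hnc : ¬ ((1 : Int) ≤ (pvMaxRun (L.flatMap PySem.Int.toChars) : Int) ∧
        (1 : Int) < ((L.flatMap PySem.Int.toChars).length : Int)) := by
      push_cast
      omega
    rw [pvLoopA_spec (L.flatMap PySem.Int.toChars) _ 1 _ (-1, -1) rfl le_rfl, if_neg hnc]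
    rw [if_pos rfl, hr]
    norm_num
  · -- a longest run of length r ≥ 1 exists and is shorter than the whole string
    set s := L.flatMap PySem.Int.toChars with hsdef
    obtain ⟨c, hcs, hc1⟩ := pvNotD L hD hr
    have hlt : pvMaxRun s < s.length := pvMaxRun_lt_of_ne s c hcs hc1
    have htn : (((s.length : Int)) - 1).toNat = s.length - 1 := by omega
    have hmin : min (pvMaxRun s) (((s.length : Int) - 1).toNat) = pvMaxRun s := by
      rw [htn]; omega
    have hcond : (1 : Int) ≤ (pvMaxRun s : Int) ∧ (1 : Int) < (s.length : Int) := by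
      constructor <;> push_cast <;> omega
    have hw0 : 0 ≤ PySem.Chars.find s (List.replicate (pvMaxRun s) '1') :=
      (PySem.Chars.find_nonneg_iff _ _).mpr ((pvRepl_infix_iff s _).mpr le_rfl)
    have hwne : PySem.Chars.find s (List.replicate (pvMaxRun s) '1') ≠ -1 := by omega
    have hspec := PySem.Chars.find_spec (s := s) (sub := List.replicate (pvMaxRun s) '1') hw0
    have hFF := hff hr
    have hj'w : (PySem.Chars.find s (List.replicate (pvMaxRun s) '1')).toNat = j' := by
      rcases Nat.lt_trichotomy
          (PySem.Chars.find s (List.replicate (pvMaxRun s) '1')).toNat j' with h | h | h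
      · have h1 := hFF.2 _ h
        have h2 := (pvRepl_prefix_iff (s.drop _) (pvMaxRun s)).mp hspec.1
        omega
      · exact h
      · exact absurd ((pvRepl_prefix_iff (s.drop j') (pvMaxRun s)).mpr hFF.1) (hspec.2 j' h)
    have hmne : ((pvMaxRun s : Int)) ≠ 0 := by push_cast; omega
    rw [pvLoopA_spec s _ 1 _ (-1, -1) rfl le_rfl, if_pos hcond, hmin]
    simp only [Int.toNat_natCast]
    rw [if_neg hwne, if_neg hwne, if_neg hmne, List.length_replicate, hj'w]
    rw [PySem.List.slice_to_natCast (s.map pvVal) j',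
      show ((j' : Int) + (pvMaxRun s : Int)) = ((j' + pvMaxRun s : Nat) : Int) by push_cast; ring,
      PySem.List.slice_from_natCast]
    simp only [List.map_append, List.map_take, List.map_drop, List.map_replicate, pvVal_two]

-- ===== VERDICT (by name: the statement is the Claim_ definition above) =====

theorem une_suite_spec : Claim_unchanged_une_suite := by
  unfold Claim_unchanged_une_suite
  intro L _ hpre
  unfold Spec_une_suite
  intro hD
  exact pvEquiv L hpre hD

theorem une_suite_changed : Claim_changed_une_suite := by
  unfold Claim_changed_une_suite; decide

theorem pvToChars_ne_nil (x : Int) (hx : 0 ≤ x) : PySem.Int.toChars x ≠ [] := by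
  unfold PySem.Int.toChars
  rw [if_neg (by omega)]
  intro h
  have h2 := @Nat.length_toDigits_pos 10 x.toNat
  rw [h] at h2
  simp at h2

theorem une_suite_tight : Claim_exact_une_suite := by
  unfold Claim_exact_une_suite
  intro L _ hpre hD
  obtain ⟨hLne, hall⟩ := hD
  rw [List.all_eq_true] at hall
  set s := L.flatMap PySem.Int.toChars with hsdef
  have hAll : ∀ c ∈ s, c = '1' := by
    intro c hc
    obtain ⟨x, hx, hcx⟩ := List.mem_flatMap.mp hc
    have hx2 := hall x hx
    rw [List.all_eq_true] at hx2
    simpa using hx2 c hcx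
  have hlead : pvLead s = s.length := (pvLead_eq_length_iff s).mpr hAll
  have hmr : pvMaxRun s = s.length :=
    le_antisymm (pvMaxRun_le_length s) (hlead ▸ pvLead_le_maxRun s)
  have hsne : s ≠ [] := by
    intro h
    obtain ⟨x, hx⟩ := List.exists_mem_of_ne_nil L hLne
    exact pvToChars_ne_nil x (hpre x hx) (List.flatMap_eq_nil_iff.mp h x hx)
  have hn1 : 1 ≤ s.length := by
    cases hs : s with
    | nil => exact absurd hs hsne
    | cons a t => simp
  have hrep : s = List.replicate s.length '1' := List.eq_replicate_of_mem hAll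
  obtain ⟨j', hfold, hff⟩ := pvScan_run L hpre
  rw [← hsdef] at hfold hff
  have hr : 0 < pvMaxRun s := by omega
  have hFF := hff hr
  have hj0 : j' = 0 := by
    have h1 := hFF.1
    have h2 := pvLead_le_length (s.drop j')
    rw [List.length_drop] at h2
    omega
  subst hj0
  have hmne : ((pvMaxRun s : Int)) ≠ 0 := by push_cast; omega
  have hB : une_suite_alt L = List.replicate s.length 2 := by
    simp only [une_suite_alt, pvDigits_eq, ← hsdef]
    rw [hfold, if_neg hmne]
    rw [PySem.List.slice_to_natCast (s.map pvVal) 0,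
      show (((0 : Nat) : Int) + (pvMaxRun s : Int)) = ((0 + pvMaxRun s : Nat) : Int) by
        push_cast; ring,
      PySem.List.slice_from_natCast, Int.toNat_natCast]
    have hdrop : (s.map pvVal).drop (0 + pvMaxRun s) = [] := by
      apply List.drop_eq_nil_of_le
      simp [hmr]
    rw [hdrop, hmr]
    simp
  rcases Nat.lt_or_ge 1 s.length with hn2 | hn1'
  · -- at least two characters: A replaces only the first length-1 ones
    have hv1 : pvVal '1' = 1 := by decide
    have hmin : min (pvMaxRun s) (((s.length : Int) - 1).toNat) = s.length - 1 := by
      have htn : (((s.length : Int)) - 1).toNat = s.length - 1 := by omega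
      rw [htn]; omega
    have hcond : (1 : Int) ≤ (pvMaxRun s : Int) ∧ (1 : Int) < (s.length : Int) := by
      constructor <;> push_cast <;> omega
    have hw0 : 0 ≤ PySem.Chars.find s (List.replicate (s.length - 1) '1') :=
      (PySem.Chars.find_nonneg_iff _ _).mpr ((pvRepl_infix_iff s _).mpr (by omega))
    have hspec := PySem.Chars.find_spec (s := s)
      (sub := List.replicate (s.length - 1) '1') hw0
    have hpre0 : List.replicate (s.length - 1) '1' <+: s.drop 0 := by
      rw [List.drop_zero, pvRepl_prefix_iff]
      omega
    have hwz : PySem.Chars.find s (List.replicate (s.length - 1) '1') = 0 := by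
      rcases Nat.eq_zero_or_pos
          (PySem.Chars.find s (List.replicate (s.length - 1) '1')).toNat with h | h
      · omega
      · exact absurd hpre0 (by simpa using hspec.2 0 h)
    have hwne : PySem.Chars.find s (List.replicate (s.length - 1) '1') ≠ -1 := by omega
    have hA : une_suite L = List.replicate (s.length - 1) 2 ++ [1] := by
      simp only [une_suite, PySem.List.len_eq, ← hsdef]
      rw [pvLoopA_spec s _ 1 _ (-1, -1) rfl le_rfl, if_pos hcond, hmin]
      simp only [Int.toNat_natCast]
      rw [if_neg hwne, if_neg hwne, List.length_replicate, hwz]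
      have hdrop : List.drop (((0 : Int)).toNat + (s.length - 1)) s = ['1'] := by
        conv_lhs => rw [hrep]
        rw [List.drop_replicate]
        simp only [List.length_replicate]
        rw [show s.length - (((0 : Int)).toNat + (s.length - 1)) = 1 by omega]
        rfl
      rw [hdrop]
      simp [List.map_append, List.map_replicate, pvVal_two, hv1]
    rw [hA, hB]
    intro h
    rw [show s.length = (s.length - 1) + 1 by omega, List.replicate_succ'] at h
    have h2 := List.append_cancel_left h
    simp at h2
  · -- a single character: A's loop range(1, 1) is empty, so A returns L unchanged
    have hn1e : s.length = 1 := by omega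
    have hnc : ¬ ((1 : Int) ≤ (pvMaxRun s : Int) ∧ (1 : Int) < (s.length : Int)) := by
      push_cast
      omega
    have hA : une_suite L = L := by
      simp only [une_suite, PySem.List.len_eq, ← hsdef]
      rw [pvLoopA_spec s _ 1 _ (-1, -1) rfl le_rfl, if_neg hnc, if_pos rfl]
    obtain ⟨x, L', rfl⟩ := List.exists_cons_of_ne_nil hLne
    have hxne := pvToChars_ne_nil x (hpre x (by simp))
    have hL' : L' = [] := by
      by_contra hne
      obtain ⟨y, T, rfl⟩ := List.exists_cons_of_ne_nil hne
      have hyne := pvToChars_ne_nil y (hpre y (by simp))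
      have hge2 : 2 ≤ s.length := by
        rw [hsdef]
        simp only [List.flatMap_cons, List.length_append]
        have h1 : 1 ≤ (PySem.Int.toChars x).length := by
          cases hx : PySem.Int.toChars x with
          | nil => exact absurd hx hxne
          | cons a t => simp
        have h2 : 1 ≤ (PySem.Int.toChars y).length := by
          cases hy : PySem.Int.toChars y with
          | nil => exact absurd hy hyne
          | cons a t => simp
        omega
      omega
    subst hL'
    have hsx : PySem.Int.toChars x = ['1'] := by
      have h1 : s = PySem.Int.toChars x := by rw [hsdef]; simp
      rw [← h1, hrep, hn1e]
      rfl
    rw [hA, hB, hn1e]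
    intro h
    have hx2 : x = 2 := by simpa using h
    subst hx2
    exact absurd hsx (by decide)
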